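-- pv_equiv track=rewrite | github.com/dbcls/rdf-doctor | doctor/doctor.py | get_fingerprint_comparison_result
-- ===== SOURCE A (Python) =====
-- def get_fingerprint_comparison_result(fingerprint_class_dict):
--     fingerprint_comparison_result = []
--     # Extract if there are multiple different strings with the same key
--     for value in fingerprint_class_dict.values():
--         if len(value) >= 2:
--             if len(fingerprint_comparison_result) != 0:
--                 fingerprint_comparison_result.append("\n# ")
--             for v in value:
--                 if len(fingerprint_comparison_result) == 0:
--                     fingerprint_comparison_result.append(v)
--                 else:
--                     fingerprint_comparison_result.append("\n# "+v)
--
--     return fingerprint_comparison_result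
-- ===== SOURCE B (Python) =====
-- def _render_rest(gs):
--     # Each non-first qualifying group contributes a bare "\n# " separator
--     # followed by its tokens, all prefixed.
--     out = []
--     for g in gs:
--         out.append("\n# ")
--         out.extend("\n# " + t for t in g)
--     return out
--
--
-- def get_fingerprint_comparison_result(fingerprint_class_dict):
--     groups = [g for g in fingerprint_class_dict.values() if len(g) >= 2]
--     if not groups:
--         return []
--     first = groups[0]
--     return [first[0]] + ["\n# " + t for t in first[1:]] + _render_rest(groups[1:])
-- ===== Notes on version B (the rewrite author's own statement) =====
-- stated objective: alternative
-- what changed: B first filters out the qualifying (len>=2) groups, then renders the result per group: the first group's head bare and its tail prefixed, and every later group as one recursively built block (separator plus prefixed tokens) built by a dedicated loop, eliminating A's single stateful loop whose branching depends on the running result length.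
import Mathlib
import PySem

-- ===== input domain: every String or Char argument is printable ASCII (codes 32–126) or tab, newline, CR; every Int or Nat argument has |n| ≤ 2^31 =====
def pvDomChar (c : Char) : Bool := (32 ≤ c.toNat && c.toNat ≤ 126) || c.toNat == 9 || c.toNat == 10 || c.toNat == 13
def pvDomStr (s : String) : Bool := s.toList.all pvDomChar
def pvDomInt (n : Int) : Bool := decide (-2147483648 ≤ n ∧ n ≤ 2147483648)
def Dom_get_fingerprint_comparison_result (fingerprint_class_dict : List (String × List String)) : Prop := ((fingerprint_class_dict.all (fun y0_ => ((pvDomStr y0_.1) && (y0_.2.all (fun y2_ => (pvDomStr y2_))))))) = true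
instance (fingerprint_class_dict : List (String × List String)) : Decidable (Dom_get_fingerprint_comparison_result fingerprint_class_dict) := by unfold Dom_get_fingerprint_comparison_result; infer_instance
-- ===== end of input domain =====

-- B filters the qualifying groups first and renders the result per group (head of the
-- first group bare, everything else prefixed blocks built recursively), instead of A's
-- single loop whose branching depends on the running result length ("alternative").
-- ===== PORT A =====
-- inner 'for v in value' loop of A
def pvAInner (res : List String) (value : List String) : List String :=
  value.foldl (fun r v => if r.length = 0 then r ++ [v] else r ++ ["\n# " ++ v]) res

def get_fingerprint_comparison_result (fingerprint_class_dict : List (String × List String)) : List String :=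
  (fingerprint_class_dict.map Prod.snd).foldl
    (fun res value =>
      if value.length ≥ 2 then
        pvAInner (if res.length ≠ 0 then res ++ ["\n# "] else res) value
      else res) []

-- ===== PORT B =====
-- ["\n# " + t for t in ts]
def pvPref (ts : List String) : List String := ts.map (fun t => "\n# " ++ t)

-- _render_rest of Source B: loop appending, per non-first qualifying group, a bare
-- separator and the group's prefixed tokens
def pvRenderRest (gs : List (List String)) : List String :=
  gs.foldl (fun out g => out ++ ("\n# " :: pvPref g)) []

def get_fingerprint_comparison_result_alt (fingerprint_class_dict : List (String × List String)) : List String :=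
  match (fingerprint_class_dict.map Prod.snd).filter (fun g => decide (g.length ≥ 2)) with
  | [] => []
  | first :: rest =>
    match first with
    | [] => []  -- unreachable: filtered groups have length ≥ 2 (Python's first[0] cannot fail)
    | t :: ts => t :: (pvPref ts ++ pvRenderRest rest)

-- ===== PRECONDITION & SPEC =====
def Spec_get_fingerprint_comparison_result (fingerprint_class_dict : List (String × List String)) (out : List String) : Prop := out = get_fingerprint_comparison_result_alt fingerprint_class_dict
instance (fingerprint_class_dict : List (String × List String)) (out : List String) : Decidable (Spec_get_fingerprint_comparison_result fingerprint_class_dict out) := by unfold Spec_get_fingerprint_comparison_result; infer_instance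

-- ===== CLAIM (what is proved, stated in full; the proofs are below) =====
def Claim_equal_get_fingerprint_comparison_result : Prop := ∀ (fingerprint_class_dict : List (String × List String)), Dom_get_fingerprint_comparison_result fingerprint_class_dict → Spec_get_fingerprint_comparison_result fingerprint_class_dict (get_fingerprint_comparison_result fingerprint_class_dict)

-- ===== LEMMAS AND PROOFS =====
-- recursive view of B's _render_rest loop (proof-only helper)
def pvBlocks : List (List String) → List String
  | [] => []
  | g :: gs => "\n# " :: (pvPref g ++ pvBlocks gs)

theorem pvRenderRest_acc (gs : List (List String)) (acc : List String) :
    gs.foldl (fun out g => out ++ ("\n# " :: pvPref g)) acc = acc ++ pvBlocks gs := by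
  induction gs generalizing acc with
  | nil => simp [pvBlocks]
  | cons g gs ih => simp [List.foldl_cons, ih, pvBlocks, List.append_assoc]

theorem pvRenderRest_eq_blocks (gs : List (List String)) :
    pvRenderRest gs = pvBlocks gs := by
  unfold pvRenderRest; rw [pvRenderRest_acc]; rfl
-- A's inner loop on a nonempty accumulator only appends prefixed tokens
theorem pvAInner_ne (vs : List String) (acc : List String) (h : acc ≠ []) :
    pvAInner acc vs = acc ++ pvPref vs := by
  induction vs generalizing acc with
  | nil => simp [pvAInner, pvPref]
  | cons v vs ih =>
      have hlen : acc.length ≠ 0 := by simpa using h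
      have h' : acc ++ ["\n# " ++ v] ≠ [] := by simp
      simp only [pvAInner, List.foldl_cons, if_neg hlen]
      have := ih (acc ++ ["\n# " ++ v]) h'
      simpa [pvAInner, pvPref, List.append_assoc] using this

-- A's outer loop on a nonempty accumulator appends one block per qualifying group
theorem pvFoldA_ne (l : List (List String)) (acc : List String) (h : acc ≠ []) :
    l.foldl (fun res value =>
        if value.length ≥ 2 then
          pvAInner (if res.length ≠ 0 then res ++ ["\n# "] else res) value
        else res) acc
    = acc ++ pvBlocks (l.filter (fun g => decide (g.length ≥ 2))) := by
  induction l generalizing acc with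
  | nil => simp [pvBlocks]
  | cons g l ih =>
      by_cases hg : g.length ≥ 2
      · have hlen : acc.length ≠ 0 := by simpa using h
        have hne : acc ++ ["\n# "] ≠ [] := by simp
        simp only [List.foldl_cons]
        rw [if_pos hg, if_pos hlen, pvAInner_ne g _ hne, ih _ (by simp)]
        simp [hg, pvBlocks, List.append_assoc]
      · simp only [List.foldl_cons]
        rw [if_neg hg, ih acc h]
        simp [hg]

-- A's loop from the empty accumulator computes B's render of the filtered groups
theorem pvFoldA_nil (l : List (List String)) :
    l.foldl (fun res value =>
        if value.length ≥ 2 then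
          pvAInner (if res.length ≠ 0 then res ++ ["\n# "] else res) value
        else res) []
    = (match l.filter (fun g => decide (g.length ≥ 2)) with
       | [] => []
       | first :: rest =>
         match first with
         | [] => []
         | t :: ts => t :: (pvPref ts ++ pvBlocks rest)) := by
  induction l with
  | nil => simp
  | cons g l ih =>
      by_cases hg : g.length ≥ 2
      · obtain ⟨t, ts, rfl⟩ : ∃ t ts, g = t :: ts := by
          cases g with
          | nil => simp at hg
          | cons t ts => exact ⟨t, ts, rfl⟩
        have h1 : pvAInner [] (t :: ts) = t :: pvPref ts := by
          simp only [pvAInner, List.foldl_cons, List.length_nil, List.nil_append,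
            if_pos]
          have := pvAInner_ne ts [t] (by simp)
          simpa [pvAInner] using this
        simp only [List.foldl_cons]
        rw [if_pos hg, if_neg (by simp : ¬(([] : List String).length ≠ 0)), h1,
          pvFoldA_ne l (t :: pvPref ts) (by simp)]
        have hts : 1 ≤ ts.length := by simpa using hg
        simp [hts]
      · simp only [List.foldl_cons]
        rw [if_neg hg, ih]
        simp [hg]

-- ===== VERDICT (by name: the statement is the Claim_ definition above) =====
theorem get_fingerprint_comparison_result_spec : Claim_equal_get_fingerprint_comparison_result := by
  intro d _
  unfold Spec_get_fingerprint_comparison_result get_fingerprint_comparison_result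
    get_fingerprint_comparison_result_alt
  simp only [pvRenderRest_eq_blocks]
  exact pvFoldA_nil (d.map Prod.snd)
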